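-- pv_equiv track=rewrite | github.com/eamazon/datawarp-v2.1 | scripts/populate_dataset_metadata.py | infer_organizational_lenses
-- ===== SOURCE A (Python) =====
-- from typing import Dict, List, Optional, Set
--
-- def infer_organizational_lenses(columns: List[Dict]) -> Dict[str, bool]:
--     """
--     Infer which organizational lenses are supported based on column patterns.
--
--     GENERIC pattern-based detection - NOT hard-coded to healthcare.
--     Works for any domain: ICB commissioning, retail, finance, etc.
--
--     Patterns:
--     - {lens}_code or {lens}_name → that lens is supported
--     - geography_level with values containing lens names → flexible lens
--     """
--     column_names = [c['column_name'].lower() for c in columns]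
--
--     lenses = {
--         'provider': False,
--         'icb': False,
--         'sub_icb': False,
--         'gp_practice': False,
--         'region': False,
--         'national': False
--     }
--
--     # Check for explicit lens columns
--     for lens in lenses.keys():
--         # Look for {lens}_code, {lens}_name, {lens}_id patterns
--         normalized_lens = lens.replace('_', '')
--         if any(normalized_lens in col or lens in col for col in column_names):
--             lenses[lens] = True
--
--     # Check for flexible geography_level column
--     for col in columns:
--         if col['column_name'].lower() in ['geography_level', 'organization_level', 'level']:
--             # Assume all lenses if flexible level column exists
--             return {k: True for k in lenses.keys()}
--
--     return lenses
-- ===== SOURCE B (Python) =====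
-- def infer_organizational_lenses(columns):
--     """Single-pass version: one traversal of the columns, OR-accumulating
--     per-lens booleans and a 'flexible level column' flag."""
--     provider = icb = sub_icb = gp_practice = region = national = False
--     flexible = False
--     for c in columns:
--         name = c['column_name'].lower()
--         if name in ('geography_level', 'organization_level', 'level'):
--             flexible = True
--         provider = provider or 'provider' in name
--         icb = icb or 'icb' in name
--         sub_icb = sub_icb or 'subicb' in name or 'sub_icb' in name
--         gp_practice = gp_practice or 'gppractice' in name or 'gp_practice' in name
--         region = region or 'region' in name
--         national = national or 'national' in name
--     if flexible:
--         return {k: True for k in ('provider', 'icb', 'sub_icb',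
--                                   'gp_practice', 'region', 'national')}
--     return {'provider': provider, 'icb': icb, 'sub_icb': sub_icb,
--             'gp_practice': gp_practice, 'region': region, 'national': national}
-- ===== Notes on version B (the rewrite author's own statement) =====
-- stated objective: simpler
-- what changed: A builds a lowered-name list and then runs six separate any() scans plus a separate flexible-column loop; B makes one pass over the columns, OR-accumulating a boolean per lens and a flexible flag, with no intermediate list and no dict mutation.
import Mathlib
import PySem

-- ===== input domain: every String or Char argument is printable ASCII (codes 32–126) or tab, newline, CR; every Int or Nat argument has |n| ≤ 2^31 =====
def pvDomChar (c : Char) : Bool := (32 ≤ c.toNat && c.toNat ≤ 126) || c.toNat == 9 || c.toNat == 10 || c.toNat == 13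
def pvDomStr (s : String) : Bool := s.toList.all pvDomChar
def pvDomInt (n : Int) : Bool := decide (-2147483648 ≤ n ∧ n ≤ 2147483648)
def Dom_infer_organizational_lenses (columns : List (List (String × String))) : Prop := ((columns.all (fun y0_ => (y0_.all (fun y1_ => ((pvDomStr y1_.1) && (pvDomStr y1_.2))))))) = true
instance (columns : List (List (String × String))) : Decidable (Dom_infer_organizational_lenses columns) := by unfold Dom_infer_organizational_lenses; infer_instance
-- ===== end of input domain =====

-- B is a single pass over the columns instead of A's six any() scans plus a
-- separate flexible-column loop; return value only (no argument is mutated).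

-- ===== PORT A =====
def infer_organizational_lenses (columns : List (List (String × String))) : List (String × Bool) :=
  -- column_names = [c['column_name'].lower() for c in columns]  (key present by Pre_)
  let column_names := columns.map (fun c => PySem.Str.lower (((PySem.Dict.mk c).get? "column_name").getD ""))
  let lenses : PySem.Dict String Bool :=
    PySem.Dict.mk [("provider", false), ("icb", false), ("sub_icb", false),
                   ("gp_practice", false), ("region", false), ("national", false)]
  -- for lens in lenses.keys(): if any(...): lenses[lens] = True
  let lenses := lenses.keys.foldl (fun d lens =>
      let normalized_lens := PySem.Str.replace lens "_" ""
      if column_names.any (fun col =>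
          PySem.Str.isIn normalized_lens col || PySem.Str.isIn lens col)
      then d.insert lens true else d) lenses
  -- for col in columns: if col['column_name'].lower() in [...]: return {k: True ...}
  if columns.any (fun c =>
      PySem.Str.lower (((PySem.Dict.mk c).get? "column_name").getD "")
        ∈ ["geography_level", "organization_level", "level"])
  then (lenses.keys.foldl (fun d k => d.insert k true) PySem.Dict.empty).items
  else lenses.items

-- ===== PORT B =====
def infer_organizational_lenses_alt (columns : List (List (String × String))) : List (String × Bool) :=
  -- state: (flexible, provider, icb, sub_icb, gp_practice, region, national)
  let st := columns.foldl
    (fun (s : Bool × Bool × Bool × Bool × Bool × Bool × Bool) c =>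
      let name := PySem.Str.lower (((PySem.Dict.mk c).get? "column_name").getD "")
      ((s.1 || decide (name ∈ ["geography_level", "organization_level", "level"])),
       (s.2.1 || PySem.Str.isIn "provider" name),
       (s.2.2.1 || PySem.Str.isIn "icb" name),
       (s.2.2.2.1 || PySem.Str.isIn "subicb" name || PySem.Str.isIn "sub_icb" name),
       (s.2.2.2.2.1 || PySem.Str.isIn "gppractice" name || PySem.Str.isIn "gp_practice" name),
       (s.2.2.2.2.2.1 || PySem.Str.isIn "region" name),
       (s.2.2.2.2.2.2 || PySem.Str.isIn "national" name)))
    (false, false, false, false, false, false, false)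
  if st.1 then
    [("provider", true), ("icb", true), ("sub_icb", true),
     ("gp_practice", true), ("region", true), ("national", true)]
  else
    [("provider", st.2.1), ("icb", st.2.2.1), ("sub_icb", st.2.2.2.1),
     ("gp_practice", st.2.2.2.2.1), ("region", st.2.2.2.2.2.1),
     ("national", st.2.2.2.2.2.2)]

-- ===== PRECONDITION & SPEC =====
-- Pre_ excludes columns lacking a 'column_name' key, on which A raises KeyError.
def Pre_infer_organizational_lenses (columns : List (List (String × String))) : Prop :=
  ∀ c ∈ columns, "column_name" ∈ c.map Prod.fst
instance (columns : List (List (String × String))) : Decidable (Pre_infer_organizational_lenses columns) := by unfold Pre_infer_organizational_lenses; infer_instance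

def pvWitness_infer_organizational_lenses : (List (List (String × String))) :=
  [[("column_name", "provider_code")], [("column_name", "Region")]]

def Spec_infer_organizational_lenses (columns : List (List (String × String))) (out : List (String × Bool)) : Prop := out = infer_organizational_lenses_alt columns
instance (columns : List (List (String × String))) (out : List (String × Bool)) : Decidable (Spec_infer_organizational_lenses columns out) := by unfold Spec_infer_organizational_lenses; infer_instance

-- ===== CLAIM (what is proved, stated in full; the proofs are below) =====
def Claim_equal_infer_organizational_lenses : Prop := ∀ (columns : List (List (String × String))), Dom_infer_organizational_lenses columns → Pre_infer_organizational_lenses columns → Spec_infer_organizational_lenses columns (infer_organizational_lenses columns)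


-- ===== LEMMAS AND PROOFS =====

-- A's update loop over the six fixed keys yields the literal dict whose value at
-- each lens is that lens's test.
theorem pv_update (q : String → Bool) :
    List.foldl (fun d lens => if q lens then d.insert lens true else d)
      (PySem.Dict.mk [("provider", false), ("icb", false), ("sub_icb", false),
                      ("gp_practice", false), ("region", false), ("national", false)])
      ["provider", "icb", "sub_icb", "gp_practice", "region", "national"]
    = PySem.Dict.mk [("provider", q "provider"), ("icb", q "icb"), ("sub_icb", q "sub_icb"),
        ("gp_practice", q "gp_practice"), ("region", q "region"), ("national", q "national")] := by
  simp only [List.foldl]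
  cases h1 : q "provider" <;> cases h2 : q "icb" <;> cases h3 : q "sub_icb" <;>
    cases h4 : q "gp_practice" <;> cases h5 : q "region" <;> cases h6 : q "national" <;>
    (try simp only [h1, h2, h3, h4, h5, h6]) <;> decide

-- B's fold accumulates, componentwise, an OR over the whole list.
theorem pv_fold_or (columns : List (List (String × String)))
    (g0 g1 g2 g3 g4 g5 g6 : List (String × String) → Bool)
    (s : Bool × Bool × Bool × Bool × Bool × Bool × Bool) :
    columns.foldl
      (fun (s : Bool × Bool × Bool × Bool × Bool × Bool × Bool) c =>
        ((s.1 || g0 c), (s.2.1 || g1 c), (s.2.2.1 || g2 c), (s.2.2.2.1 || g3 c),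
         (s.2.2.2.2.1 || g4 c), (s.2.2.2.2.2.1 || g5 c), (s.2.2.2.2.2.2 || g6 c))) s
    = ((s.1 || columns.any g0), (s.2.1 || columns.any g1), (s.2.2.1 || columns.any g2),
       (s.2.2.2.1 || columns.any g3), (s.2.2.2.2.1 || columns.any g4),
       (s.2.2.2.2.2.1 || columns.any g5), (s.2.2.2.2.2.2 || columns.any g6)) := by
  induction columns generalizing s with
  | nil => simp
  | cons c cs ih => simp [List.foldl_cons, ih, Bool.or_assoc]

-- ===== VERDICT (by name: the statement is the Claim_ definition above) =====
theorem infer_organizational_lenses_spec : Claim_equal_infer_organizational_lenses := by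
  intro columns _ _
  unfold Spec_infer_organizational_lenses infer_organizational_lenses infer_organizational_lenses_alt
  simp only [PySem.Dict.keys_mk, List.map_cons, List.map_nil, Bool.or_assoc]
  rw [pv_update, pv_fold_or]
  have e1 : PySem.Str.replace "provider" "_" "" = "provider" := by decide
  have e2 : PySem.Str.replace "icb" "_" "" = "icb" := by decide
  have e3 : PySem.Str.replace "sub_icb" "_" "" = "subicb" := by decide
  have e4 : PySem.Str.replace "gp_practice" "_" "" = "gppractice" := by decide
  have e5 : PySem.Str.replace "region" "_" "" = "region" := by decide
  have e6 : PySem.Str.replace "national" "_" "" = "national" := by decide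
  simp only [e1, e2, e3, e4, e5, e6, Bool.or_self, Bool.false_or,
    List.any_map, Function.comp_def, PySem.Dict.keys_mk, List.map_cons, List.map_nil, List.foldl]
  have etrue : ((((((PySem.Dict.empty.insert "provider" true).insert "icb" true).insert "sub_icb"
          true).insert "gp_practice" true).insert "region" true).insert "national" true).items
      = [("provider", true), ("icb", true), ("sub_icb", true), ("gp_practice", true),
         ("region", true), ("national", true)] := by decide
  rw [etrue]
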